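-- pv_equiv track=rewrite | github.com/yu1uuu/Gomoku | game.py | detect_closed
-- ===== SOURCE A (Python) =====
-- def is_sq_in_board(board, y, x):
--     if 0 <= y < len(board) and 0 <= x < len(board[0]):
--         return True
--     return False
--
-- def is_bounded(board, y_end, x_end, length, d_y, d_x):
--     open_bool_1 = is_sq_in_board(board, y_end + d_y, x_end + d_x) and board[y_end + d_y][x_end + d_x] == " "
--     open_bool_2 = is_sq_in_board(board, y_end - d_y * length, x_end - d_x * length) and board[y_end - d_y * length][x_end - d_x * length] == " "
--     if open_bool_1 and open_bool_2:
--         return "OPEN"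
--     elif (open_bool_1 and not open_bool_2) or (open_bool_2 and not open_bool_1):
--         return "SEMIOPEN"
--     else:
--         return "CLOSED"
--
-- def detect_closed(board, col, y_start, x_start, length, d_y, d_x):
--     y, x, = y_start, x_start; sequence = length; closed_count = 0
--     while is_sq_in_board(board, y, x):
--         if board[y][x] == col:
--             sequence -= 1
--         else:
--             if sequence == 0:
--                 if is_bounded(board, y - d_y, x - d_x, length, d_y, d_x) == "CLOSED":
--                     closed_count += 1
--             sequence = length
--         y += d_y;
--         x += d_x
--     if sequence == 0:
--         if is_bounded(board, y - d_y, x - d_x, length, d_y, d_x) == "CLOSED":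
--             closed_count += 1
--     return closed_count
-- ===== SOURCE B (Python) =====
-- def is_sq_in_board(board, y, x):
--     if 0 <= y < len(board) and 0 <= x < len(board[0]):
--         return True
--     return False
--
-- def is_bounded(board, y_end, x_end, length, d_y, d_x):
--     open_bool_1 = is_sq_in_board(board, y_end + d_y, x_end + d_x) and board[y_end + d_y][x_end + d_x] == " "
--     open_bool_2 = is_sq_in_board(board, y_end - d_y * length, x_end - d_x * length) and board[y_end - d_y * length][x_end - d_x * length] == " "
--     if open_bool_1 and open_bool_2:
--         return "OPEN"
--     elif (open_bool_1 and not open_bool_2) or (open_bool_2 and not open_bool_1):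
--         return "SEMIOPEN"
--     else:
--         return "CLOSED"
--
-- def detect_closed(board, col, y_start, x_start, length, d_y, d_x):
--     # materialize the in-board cells along the line
--     cells = []
--     y, x = y_start, x_start
--     while is_sq_in_board(board, y, x):
--         cells.append(board[y][x])
--         y += d_y
--         x += d_x
--     n = len(cells)
--     # a maximal run of col of length exactly `length` ends at cell i-1
--     total = 0
--     for i in range(n + 1):
--         if (0 <= length <= i
--                 and all(cells[j] == col for j in range(i - length, i))
--                 and (i - length == 0 or cells[i - length - 1] != col)
--                 and (i == n or cells[i] != col)
--                 and is_bounded(board, y_start + (i - 1) * d_y,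
--                                x_start + (i - 1) * d_x, length, d_y, d_x) == "CLOSED"):
--             total += 1
--     return total
-- ===== Notes on version B (the rewrite author's own statement) =====
-- stated objective: alternative
-- what changed: A detects runs with a fused sliding countdown counter updated while walking the board line; B first materializes the line's cells into a list and then counts boundary indices i whose preceding window of exactly `length` consecutive `col` cells is maximal and CLOSED-bounded, replacing the stateful one-pass counter with a materialize-then-window-scan decomposition.
-- outside the precondition, e.g. on detect_closed([['a', 'b'], ['c']], 'z', 0, 0, 5, 0, 1): A returns 0, B returns 0
import Mathlib
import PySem

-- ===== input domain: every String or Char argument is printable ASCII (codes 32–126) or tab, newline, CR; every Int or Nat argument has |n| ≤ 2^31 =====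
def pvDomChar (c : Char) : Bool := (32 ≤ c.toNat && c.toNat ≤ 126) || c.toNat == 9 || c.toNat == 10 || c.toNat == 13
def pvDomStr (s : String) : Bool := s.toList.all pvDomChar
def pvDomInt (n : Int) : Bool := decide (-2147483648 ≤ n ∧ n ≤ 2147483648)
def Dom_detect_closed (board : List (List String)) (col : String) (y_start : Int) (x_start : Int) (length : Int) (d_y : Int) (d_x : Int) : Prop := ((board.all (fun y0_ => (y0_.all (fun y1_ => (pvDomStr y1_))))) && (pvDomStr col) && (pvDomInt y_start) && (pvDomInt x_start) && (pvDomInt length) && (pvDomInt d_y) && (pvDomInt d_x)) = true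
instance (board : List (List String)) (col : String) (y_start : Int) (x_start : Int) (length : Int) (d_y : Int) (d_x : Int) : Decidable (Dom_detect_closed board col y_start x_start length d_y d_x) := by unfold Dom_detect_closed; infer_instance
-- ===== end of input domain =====

-- B replaces A's fused sliding-countdown pass with: materialize the line's cells, then count
-- boundary indices whose preceding exact-`length` maximal col-window is CLOSED-bounded (objective: alternative).

-- ===== PORT A =====
-- is_sq_in_board(board, y, x)  (len(board[0]) is only reached when 0 <= y < len(board), so headD [] is exact)
def pvInBoard (board : List (List String)) (y : Int) (x : Int) : Bool :=
  decide (0 ≤ y) && decide (y < (board.length : Int)) && decide (0 ≤ x) && decide (x < ((board.headD []).length : Int))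

-- board[y][x]; only used under pvInBoard-style guards (ragged rows on which Python raises are outside Pre_)
def pvCell (board : List (List String)) (y : Int) (x : Int) : String :=
  (board.getD y.toNat []).getD x.toNat ""

-- is_bounded(board, y_end, x_end, length, d_y, d_x)
def pvIsBounded (board : List (List String)) (y_end : Int) (x_end : Int) (length : Int) (d_y : Int) (d_x : Int) : String :=
  let ob1 := pvInBoard board (y_end + d_y) (x_end + d_x) && (pvCell board (y_end + d_y) (x_end + d_x) == " ")
  let ob2 := pvInBoard board (y_end - d_y * length) (x_end - d_x * length) && (pvCell board (y_end - d_y * length) (x_end - d_x * length) == " ")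
  if ob1 && ob2 then "OPEN"
  else if (ob1 && !ob2) || (ob2 && !ob1) then "SEMIOPEN"
  else "CLOSED"

-- fuel bound for the while-loops: under Pre_ the walk leaves the board in < pvFuel steps
def pvFuel (board : List (List String)) : Nat := board.length + (board.headD []).length + 1

-- the while-loop of detect_closed, fuel-guarded (fuel suffices under Pre_, proved below)
def pvLoopA (board : List (List String)) (col : String) (length : Int) (d_y : Int) (d_x : Int) :
    Nat → Int → Int → Int → Int → Int
  | 0, _, _, _, closed_count => closed_count
  | fuel+1, y, x, sequence, closed_count =>
    if pvInBoard board y x then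
      if pvCell board y x == col then
        pvLoopA board col length d_y d_x fuel (y + d_y) (x + d_x) (sequence - 1) closed_count
      else
        pvLoopA board col length d_y d_x fuel (y + d_y) (x + d_x) length
          (if sequence == 0 && (pvIsBounded board (y - d_y) (x - d_x) length d_y d_x == "CLOSED")
           then closed_count + 1 else closed_count)
    else
      if sequence == 0 && (pvIsBounded board (y - d_y) (x - d_x) length d_y d_x == "CLOSED")
      then closed_count + 1 else closed_count

def detect_closed (board : List (List String)) (col : String) (y_start : Int) (x_start : Int) (length : Int) (d_y : Int) (d_x : Int) : Int :=
  pvLoopA board col length d_y d_x (pvFuel board) y_start x_start length 0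

-- ===== PORT B =====
-- materialize the in-board cells along the line (B's first while-loop, fuel-guarded like A's)
def pvGenCells (board : List (List String)) (d_y : Int) (d_x : Int) :
    Nat → Int → Int → List String
  | 0, _, _ => []
  | fuel+1, y, x =>
    if pvInBoard board y x then pvCell board y x :: pvGenCells board d_y d_x fuel (y + d_y) (x + d_x) else []

def detect_closed_alt (board : List (List String)) (col : String) (y_start : Int) (x_start : Int) (length : Int) (d_y : Int) (d_x : Int) : Int :=
  let cells := pvGenCells board d_y d_x (pvFuel board) y_start x_start
  let n : Int := (cells.length : Int)
  (PySem.List.pyRange 0 (n + 1) 1).foldl (fun total i =>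
    if (decide (0 ≤ length) && decide (length ≤ i))
        && (PySem.List.pyRange (i - length) i 1).all (fun j => cells.getD j.toNat "" == col)
        && (decide (i - length = 0) || !(cells.getD (i - length - 1).toNat "" == col))
        && (decide (i = n) || !(cells.getD i.toNat "" == col))
        && (pvIsBounded board (y_start + (i - 1) * d_y) (x_start + (i - 1) * d_x) length d_y d_x == "CLOSED")
    then total + 1 else total) 0

-- ===== PRECONDITION & SPEC =====
-- Pre_ excludes (d_y,d_x)=(0,0) with an in-board start (A loops forever) and ragged boards reachable
-- from the start configuration (in-board start, or length 0), on which A generally raises IndexError;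
-- a few such ragged boards whose short rows the walk never touches are excluded although A returns (see cites).
def Pre_detect_closed (board : List (List String)) (col : String) (y_start : Int) (x_start : Int) (length : Int) (d_y : Int) (d_x : Int) : Prop :=
  ¬(d_y = 0 ∧ d_x = 0 ∧ 0 ≤ y_start ∧ y_start < (board.length : Int) ∧ 0 ≤ x_start ∧ x_start < ((board.headD []).length : Int))
  ∧ ((∀ row ∈ board, (board.headD []).length ≤ row.length)
     ∨ (length ≠ 0 ∧ ¬(0 ≤ y_start ∧ y_start < (board.length : Int) ∧ 0 ≤ x_start ∧ x_start < ((board.headD []).length : Int))))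

instance (board : List (List String)) (col : String) (y_start : Int) (x_start : Int) (length : Int) (d_y : Int) (d_x : Int) : Decidable (Pre_detect_closed board col y_start x_start length d_y d_x) := by unfold Pre_detect_closed; infer_instance

def pvWitness_detect_closed : List (List String) × String × Int × Int × Int × Int × Int :=
  ([[" ", "b"], ["b", "b"]], "b", 0, 1, 2, 1, 0)

def Spec_detect_closed (board : List (List String)) (col : String) (y_start : Int) (x_start : Int) (length : Int) (d_y : Int) (d_x : Int) (out : Int) : Prop := out = detect_closed_alt board col y_start x_start length d_y d_x
instance (board : List (List String)) (col : String) (y_start : Int) (x_start : Int) (length : Int) (d_y : Int) (d_x : Int) (out : Int) : Decidable (Spec_detect_closed board col y_start x_start length d_y d_x out) := by unfold Spec_detect_closed; infer_instance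

-- ===== CLAIM (what is proved, stated in full; the proofs are below) =====
def Claim_equal_detect_closed : Prop := ∀ (board : List (List String)) (col : String) (y_start : Int) (x_start : Int) (length : Int) (d_y : Int) (d_x : Int), Dom_detect_closed board col y_start x_start length d_y d_x → Pre_detect_closed board col y_start x_start length d_y d_x → Spec_detect_closed board col y_start x_start length d_y d_x (detect_closed board col y_start x_start length d_y d_x)

-- ===== LEMMAS AND PROOFS =====

-- A's loop re-expressed as a recursion over the materialized cell list
def aList (board : List (List String)) (col : String) (length : Int) (d_y : Int) (d_x : Int) :
    List String → Int → Int → Int → Int → Int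
  | [], y, x, sequence, closed_count =>
    if sequence == 0 && (pvIsBounded board (y - d_y) (x - d_x) length d_y d_x == "CLOSED")
    then closed_count + 1 else closed_count
  | c :: cs, y, x, sequence, closed_count =>
    if c == col then
      aList board col length d_y d_x cs (y + d_y) (x + d_x) (sequence - 1) closed_count
    else
      aList board col length d_y d_x cs (y + d_y) (x + d_x) length
        (if sequence == 0 && (pvIsBounded board (y - d_y) (x - d_x) length d_y d_x == "CLOSED")
         then closed_count + 1 else closed_count)

-- B's per-index condition (the body of B's fold)
def condB (board : List (List String)) (col : String) (length : Int) (d_y : Int) (d_x : Int)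
    (y_start : Int) (x_start : Int) (cells : List String) (i : Int) : Bool :=
  (decide (0 ≤ length) && decide (length ≤ i))
    && (PySem.List.pyRange (i - length) i 1).all (fun j => cells.getD j.toNat "" == col)
    && (decide (i - length = 0) || !(cells.getD (i - length - 1).toNat "" == col))
    && (decide (i = (cells.length : Int)) || !(cells.getD i.toNat "" == col))
    && (pvIsBounded board (y_start + (i - 1) * d_y) (x_start + (i - 1) * d_x) length d_y d_x == "CLOSED")

lemma alt_eq_countP (board : List (List String)) (col : String) (y_start x_start length d_y d_x : Int) :
    detect_closed_alt board col y_start x_start length d_y d_x =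
    ((PySem.List.pyRange 0 ((((pvGenCells board d_y d_x (pvFuel board) y_start x_start).length : Int)) + 1) 1).countP
      (condB board col length d_y d_x y_start x_start (pvGenCells board d_y d_x (pvFuel board) y_start x_start)) : Int) := by
  show (PySem.List.pyRange 0 _ 1).foldl (fun total i => if condB board col length d_y d_x y_start x_start (pvGenCells board d_y d_x (pvFuel board) y_start x_start) i then total + 1 else total) 0 = _
  rw [PySem.List.foldl_if_add_one]
  simp

lemma loopA_eq_aList (board : List (List String)) (col : String) (length d_y d_x : Int) :
    ∀ (f : Nat) (y x seq cc : Int), (pvGenCells board d_y d_x f y x).length < f →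
      pvLoopA board col length d_y d_x f y x seq cc =
      aList board col length d_y d_x (pvGenCells board d_y d_x f y x) y x seq cc := by
  intro f
  induction f with
  | zero => intro y x seq cc h; omega
  | succ f ih =>
    intro y x seq cc h
    by_cases hb : pvInBoard board y x = true
    · simp only [pvGenCells, hb, if_pos] at h ⊢
      by_cases hc : (pvCell board y x == col) = true
      · simp only [pvLoopA, hb, if_pos, hc, aList]
        exact ih _ _ _ _ (by simpa using Nat.lt_of_succ_lt_succ (by simpa using h))
      · simp only [pvLoopA, hb, if_pos, aList, hc, Bool.false_eq_true, if_false]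
        exact ih _ _ _ _ (by simpa using Nat.lt_of_succ_lt_succ (by simpa using h))
    · simp only [pvGenCells, hb, Bool.false_eq_true, if_false, pvLoopA, aList]
lemma genLen_bound (board : List (List String)) (d_y d_x : Int) :
    ∀ (f : Nat) (y x : Int),
      (1 ≤ d_y → ((pvGenCells board d_y d_x f y x).length : Int) ≤ max ((board.length : Int) - y) 0) ∧
      (d_y ≤ -1 → ((pvGenCells board d_y d_x f y x).length : Int) ≤ max (y + 1) 0) ∧
      (1 ≤ d_x → ((pvGenCells board d_y d_x f y x).length : Int) ≤ max (((board.headD []).length : Int) - x) 0) ∧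
      (d_x ≤ -1 → ((pvGenCells board d_y d_x f y x).length : Int) ≤ max (x + 1) 0) := by
  intro f
  induction f with
  | zero => intro y x; simp [pvGenCells]
  | succ f ih =>
    intro y x
    by_cases hb : pvInBoard board y x = true
    · have hin : 0 ≤ y ∧ y < (board.length : Int) ∧ 0 ≤ x ∧ x < ((board.headD []).length : Int) := by
        simp only [pvInBoard, Bool.and_eq_true, decide_eq_true_eq] at hb; tauto
      simp only [pvGenCells, hb, if_pos, List.length_cons]
      obtain ⟨h1, h2, h3, h4⟩ := ih (y + d_y) (x + d_x)
      refine ⟨fun h => ?_, fun h => ?_, fun h => ?_, fun h => ?_⟩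
      · have := h1 h; push_cast at this ⊢; omega
      · have := h2 h; push_cast at this ⊢; omega
      · have := h3 h; push_cast at this ⊢; omega
      · have := h4 h; push_cast at this ⊢; omega
    · simp only [pvGenCells, hb, Bool.false_eq_true, if_false, List.length_nil]
      refine ⟨fun _ => ?_, fun _ => ?_, fun _ => ?_, fun _ => ?_⟩ <;> simp

lemma gen_short (board : List (List String)) (d_y d_x y x : Int)
    (h : ¬(d_y = 0 ∧ d_x = 0 ∧ 0 ≤ y ∧ y < (board.length : Int) ∧ 0 ≤ x ∧ x < ((board.headD []).length : Int))) :
    (pvGenCells board d_y d_x (pvFuel board) y x).length < pvFuel board := by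
  by_cases hb : pvInBoard board y x = true
  · have hin : 0 ≤ y ∧ y < (board.length : Int) ∧ 0 ≤ x ∧ x < ((board.headD []).length : Int) := by
      simp only [pvInBoard, Bool.and_eq_true, decide_eq_true_eq] at hb; tauto
    have hd : d_y ≠ 0 ∨ d_x ≠ 0 := by tauto
    obtain ⟨h1, h2, h3, h4⟩ := genLen_bound board d_y d_x (pvFuel board) y x
    unfold pvFuel at *
    rcases hd with hd | hd
    · rcases Int.lt_or_lt_of_ne hd with hneg | hpos
      · have := h2 (by omega); push_cast at this; omega
      · have := h1 (by omega); push_cast at this; omega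
    · rcases Int.lt_or_lt_of_ne hd with hneg | hpos
      · have := h4 (by omega); push_cast at this; omega
      · have := h3 (by omega); push_cast at this; omega
  · have : pvFuel board = (board.length + (board.headD []).length) + 1 := rfl
    rw [this]
    simp [pvGenCells, hb]
lemma run_iff (l : List String) (col : String) (k : Nat) (L : Int)
    (hk : k ≤ l.length)
    (ha : ∀ j : Nat, l.length - k ≤ j → j < l.length → l.getD j "" = col)
    (hc : k < l.length → l.getD (l.length - k - 1) "" ≠ col) :
    ((0 ≤ L ∧ L ≤ (l.length : Int))
      ∧ (∀ j : Int, (l.length : Int) - L ≤ j → j < (l.length : Int) → l.getD j.toNat "" = col)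
      ∧ ((l.length : Int) - L = 0 ∨ l.getD ((l.length : Int) - L - 1).toNat "" ≠ col))
    ↔ L = (k : Int) := by
  constructor
  · rintro ⟨⟨h0, hLn⟩, hall, hbound⟩
    by_contra hne
    rcases lt_or_gt_of_ne hne with hlt | hgt
    · -- L < k : cell at index n - L - 1 is col by ha, but hbound says otherwise
      have hn0 : (l.length : Int) - L ≠ 0 := by omega
      rcases hbound with h | h
      · omega
      · apply h
        have : ((l.length : Int) - L - 1).toNat = l.length - L.toNat - 1 := by omega
        rw [this]
        exact ha _ (by omega) (by omega)
    · -- L > k : index n - k - 1 is col by hall, contradicting hc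
      have hkn : k < l.length := by omega
      apply hc hkn
      have := hall ((l.length : Int) - (k : Int) - 1) (by omega) (by omega)
      have heq : (((l.length : Int) - (k : Int) - 1)).toNat = l.length - k - 1 := by omega
      rwa [heq] at this
  · rintro rfl
    refine ⟨⟨by omega, by omega⟩, fun j hj1 hj2 => ?_, ?_⟩
    · have : j.toNat = j := by omega
      apply ha <;> omega
    · by_cases hkn : k = l.length
      · left; omega
      · right
        have : ((l.length : Int) - (k : Int) - 1).toNat = l.length - k - 1 := by omega
        rw [this]
        exact hc (by omega)
lemma condB_iff (board : List (List String)) (col : String) (L d_y d_x y_start x_start : Int)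
    (pre suf : List String) (k : Nat)
    (hk : k ≤ pre.length)
    (ha : ∀ j : Nat, pre.length - k ≤ j → j < pre.length → pre.getD j "" = col)
    (hc : k < pre.length → pre.getD (pre.length - k - 1) "" ≠ col) :
    (condB board col L d_y d_x y_start x_start (pre ++ suf) (pre.length : Int) = true)
    ↔ (L = (k : Int)
       ∧ ((decide ((pre.length : Int) = ((pre ++ suf).length : Int)) || !((pre ++ suf).getD pre.length "" == col)) = true)
       ∧ ((pvIsBounded board (y_start + ((pre.length : Int) - 1) * d_y) (x_start + ((pre.length : Int) - 1) * d_x) L d_y d_x == "CLOSED") = true)) := by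
  by_cases hg : 0 ≤ L ∧ L ≤ (pre.length : Int)
  · have htrans : ((0 ≤ L ∧ L ≤ ((pre.length : Int)))
        ∧ (∀ j : Int, ((pre.length : Int)) - L ≤ j → j < ((pre.length : Int)) → pre.getD j.toNat "" = col)
        ∧ (((pre.length : Int)) - L = 0 ∨ pre.getD (((pre.length : Int)) - L - 1).toNat "" ≠ col))
        ↔ L = (k : Int) := run_iff pre col k L hk ha hc
    constructor
    · intro h
      simp only [condB, Bool.and_eq_true, Bool.or_eq_true, decide_eq_true_eq,
        List.all_eq_true, PySem.List.mem_pyRange_one] at h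
      obtain ⟨⟨⟨⟨hg', hwin⟩, hbef⟩, haft⟩, hcl⟩ := h
      refine ⟨?_, ?_, hcl⟩
      · apply htrans.mp
        refine ⟨hg, fun j h1 h2 => ?_, ?_⟩
        · have hj := hwin j ⟨h1, h2⟩
          rw [List.getD_append _ _ _ _ (by omega)] at hj
          simpa using hj
        · by_cases h0 : (pre.length : Int) - L = 0
          · exact Or.inl h0
          · refine Or.inr ?_
            rcases hbef with h | h
            · omega
            · rw [List.getD_append _ _ _ _ (by omega)] at h
              simpa using h
      · simp only [Bool.or_eq_true, decide_eq_true_eq]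
        tauto
    · rintro ⟨hL, haft, hcl⟩
      have hrun := htrans.mpr hL
      obtain ⟨-, hwin, hbef⟩ := hrun
      simp only [condB, Bool.and_eq_true, Bool.or_eq_true, decide_eq_true_eq,
        List.all_eq_true, PySem.List.mem_pyRange_one]
      refine ⟨⟨⟨⟨⟨by omega, by omega⟩, fun j hj => ?_⟩, ?_⟩, by simpa using haft⟩, hcl⟩
      · rw [List.getD_append _ _ _ _ (by omega)]
        simpa using hwin j hj.1 hj.2
      · by_cases h0 : (pre.length : Int) - L = 0
        · exact Or.inl h0
        · rcases hbef with h | h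
          · exact absurd h h0
          · refine Or.inr ?_
            rw [List.getD_append _ _ _ _ (by omega)]
            simpa using h
  · constructor
    · intro h
      exfalso
      simp only [condB, Bool.and_eq_true, decide_eq_true_eq] at h
      exact hg ⟨h.1.1.1.1.1, h.1.1.1.1.2⟩
    · rintro ⟨hL, -, -⟩
      exfalso
      exact hg (by omega)
lemma aList_eq_count (board : List (List String)) (col : String) (length d_y d_x y_start x_start : Int) :
    ∀ (suf pre : List String) (k : Nat) (cc : Int),
      k ≤ pre.length →
      (∀ j : Nat, pre.length - k ≤ j → j < pre.length → pre.getD j "" = col) →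
      (k < pre.length → pre.getD (pre.length - k - 1) "" ≠ col) →
      aList board col length d_y d_x suf (y_start + (pre.length : Int) * d_y) (x_start + (pre.length : Int) * d_x) (length - (k : Int)) cc
        = cc + ((PySem.List.pyRange (pre.length : Int) (((pre ++ suf).length : Int) + 1) 1).countP
            (condB board col length d_y d_x y_start x_start (pre ++ suf)) : Int) := by
  intro suf
  induction suf with
  | nil =>
    intro pre k cc hk ha hc
    simp only [List.append_nil]
    rw [PySem.List.pyRange_one_singleton, List.countP_singleton]
    have hiff := condB_iff board col length d_y d_x y_start x_start pre [] k hk ha hc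
    simp only [List.append_nil] at hiff
    simp only [aList]
    have ecoord : y_start + (pre.length : Int) * d_y - d_y = y_start + ((pre.length : Int) - 1) * d_y := by ring
    have ecoord2 : x_start + (pre.length : Int) * d_x - d_x = x_start + ((pre.length : Int) - 1) * d_x := by ring
    rw [ecoord, ecoord2]
    by_cases hL : length = (k : Int)
    · have hseq : (length - (k : Int) == 0) = true := by simp [hL]
      rw [hseq]
      by_cases hcl : (pvIsBounded board (y_start + ((pre.length : Int) - 1) * d_y) (x_start + ((pre.length : Int) - 1) * d_x) length d_y d_x == "CLOSED") = true
      · have hcB : condB board col length d_y d_x y_start x_start pre (pre.length : Int) = true :=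
          hiff.mpr ⟨hL, by simp, hcl⟩
        simp [hcB, hcl]
      · have hcB : condB board col length d_y d_x y_start x_start pre (pre.length : Int) = false := by
          rw [Bool.eq_false_iff]
          intro h
          exact hcl (hiff.mp h).2.2
        have hclF : (pvIsBounded board (y_start + ((pre.length : Int) - 1) * d_y) (x_start + ((pre.length : Int) - 1) * d_x) length d_y d_x == "CLOSED") = false := by
          simpa using hcl
        simp [hcB, hclF]
    · have hseq : (length - (k : Int) == 0) = false := by
        simp only [beq_eq_false_iff_ne, ne_eq]
        omega
      rw [hseq]
      have hcB : condB board col length d_y d_x y_start x_start pre (pre.length : Int) = false := by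
        rw [Bool.eq_false_iff]
        intro h
        exact hL (hiff.mp h).1
      simp [hcB]
  | cons c cs ih =>
    intro pre k cc hk ha hc
    have hlen : ((pre ++ c :: cs).length : Int) = (pre.length : Int) + (cs.length : Int) + 1 := by
      simp; ring
    have hcons : PySem.List.pyRange (pre.length : Int) (((pre ++ c :: cs).length : Int) + 1) 1
        = (pre.length : Int) :: PySem.List.pyRange ((pre.length : Int) + 1) (((pre ++ c :: cs).length : Int) + 1) 1 := by
      apply PySem.List.pyRange_one_cons
      omega
    rw [hcons, List.countP_cons]
    have hiff := condB_iff board col length d_y d_x y_start x_start pre (c :: cs) k hk ha hc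
    have hgetmid : (pre ++ c :: cs).getD pre.length "" = c := by
      simp [List.getD_eq_getElem?_getD]
    -- facts about the extended prefix pre ++ [c]
    have hassoc : (pre ++ [c]) ++ cs = pre ++ c :: cs := by simp
    have hlen' : ((pre ++ [c]).length : Int) = (pre.length : Int) + 1 := by simp
    have ecoordy : y_start + (pre.length : Int) * d_y + d_y = y_start + (((pre ++ [c]).length : Int)) * d_y := by
      rw [hlen']; ring
    have ecoordx : x_start + (pre.length : Int) * d_x + d_x = x_start + (((pre ++ [c]).length : Int)) * d_x := by
      rw [hlen']; ring
    have hgetc : (pre ++ [c]).getD pre.length "" = c := by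
      simp [List.getD_eq_getElem?_getD]
    by_cases hcol : (c == col) = true
    · -- the cell extends the run: nothing is counted at this index
      have hcB : condB board col length d_y d_x y_start x_start (pre ++ c :: cs) (pre.length : Int) = false := by
        rw [Bool.eq_false_iff]
        intro h
        have h2 := (hiff.mp h).2.1
        simp only [Bool.or_eq_true, decide_eq_true_eq] at h2
        rcases h2 with h2 | h2
        · simp at h2
          omega
        · rw [hgetmid] at h2
          simp [hcol] at h2
      rw [hcB]
      simp only [aList, hcol, if_pos]
      have harg : length - (k : Int) - 1 = length - (((k + 1 : Nat)) : Int) := by push_cast; ring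
      rw [harg, ecoordy, ecoordx]
      have := ih (pre ++ [c]) (k + 1) cc
        (by simp; omega)
        (by
          intro j h1 h2
          simp only [List.length_append, List.length_singleton] at h1 h2
          by_cases hj : j < pre.length
          · rw [List.getD_append _ _ _ _ hj]
            exact ha j (by omega) hj
          · have : j = pre.length := by omega
            rw [this, hgetc]
            simpa using hcol)
        (by
          intro h1
          simp only [List.length_append, List.length_singleton] at h1 ⊢
          have : pre.length + 1 - (k + 1) - 1 = pre.length - k - 1 := by omega
          rw [this, List.getD_append _ _ _ _ (by omega)]
          exact hc (by omega))
      rw [this, hassoc]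
      simp
    · -- the run (if of exact length) ends at this boundary index
      simp only [aList, hcol, Bool.false_eq_true, if_false]
      have ecoord : y_start + (pre.length : Int) * d_y - d_y = y_start + ((pre.length : Int) - 1) * d_y := by ring
      have ecoord2 : x_start + (pre.length : Int) * d_x - d_x = x_start + ((pre.length : Int) - 1) * d_x := by ring
      rw [ecoord, ecoord2]
      have haft : (decide ((pre.length : Int) = ((pre ++ c :: cs).length : Int)) || !((pre ++ c :: cs).getD pre.length "" == col)) = true := by
        rw [hgetmid]
        simp [hcol]
      have hcnd : condB board col length d_y d_x y_start x_start (pre ++ c :: cs) (pre.length : Int)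
          = ((length - (k : Int) == 0) && (pvIsBounded board (y_start + ((pre.length : Int) - 1) * d_y) (x_start + ((pre.length : Int) - 1) * d_x) length d_y d_x == "CLOSED")) := by
        by_cases hL : length = (k : Int)
        · have h1 : (length - (k : Int) == 0) = true := by simp [hL]
          rw [h1, Bool.true_and]
          by_cases hcl : (pvIsBounded board (y_start + ((pre.length : Int) - 1) * d_y) (x_start + ((pre.length : Int) - 1) * d_x) length d_y d_x == "CLOSED") = true
          · rw [hcl]
            exact hiff.mpr ⟨hL, haft, hcl⟩
          · rw [show (pvIsBounded board (y_start + ((pre.length : Int) - 1) * d_y) (x_start + ((pre.length : Int) - 1) * d_x) length d_y d_x == "CLOSED") = false from by simpa using hcl]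
            rw [Bool.eq_false_iff]
            intro h
            exact hcl (hiff.mp h).2.2
        · have h1 : (length - (k : Int) == 0) = false := by
            simp only [beq_eq_false_iff_ne, ne_eq]
            omega
          rw [h1, Bool.false_and, Bool.eq_false_iff]
          intro h
          exact hL (hiff.mp h).1
      have := ih (pre ++ [c]) 0
        (if (length - (k : Int) == 0) && (pvIsBounded board (y_start + ((pre.length : Int) - 1) * d_y) (x_start + ((pre.length : Int) - 1) * d_x) length d_y d_x == "CLOSED") then cc + 1 else cc)
        (by simp)
        (by intro j h1 h2; simp at h1 h2; omega)
        (by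
          intro h1
          simp only [List.length_append, List.length_singleton]
          have : pre.length + 1 - 0 - 1 = pre.length := by omega
          rw [this, hgetc]
          simpa using hcol)
      simp only [hassoc, Nat.cast_zero, sub_zero, List.length_append, List.length_singleton,
        Nat.cast_add, Nat.cast_one] at this
      rw [ecoordy, ecoordx]
      simp only [List.length_append, List.length_singleton, Nat.cast_add, Nat.cast_one] at this ⊢
      rw [this, hcnd]
      by_cases hfire : ((length - (k : Int) == 0) && (pvIsBounded board (y_start + ((pre.length : Int) - 1) * d_y) (x_start + ((pre.length : Int) - 1) * d_x) length d_y d_x == "CLOSED")) = true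
      · rw [hfire]
        push_cast
        simp
        omega
      · rw [show ((length - (k : Int) == 0) && (pvIsBounded board (y_start + ((pre.length : Int) - 1) * d_y) (x_start + ((pre.length : Int) - 1) * d_x) length d_y d_x == "CLOSED")) = false from by simpa using hfire]
        push_cast
        simp

-- ===== VERDICT (by name: the statement is the Claim_ definition above) =====
theorem detect_closed_spec : Claim_equal_detect_closed := by
  intro board col y_start x_start length d_y d_x _hDom hPre
  unfold Spec_detect_closed
  obtain ⟨h1, -⟩ := hPre
  have hshort := gen_short board d_y d_x y_start x_start h1
  unfold detect_closed
  rw [loopA_eq_aList board col length d_y d_x (pvFuel board) y_start x_start length 0 hshort]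
  have hmain := aList_eq_count board col length d_y d_x y_start x_start
    (pvGenCells board d_y d_x (pvFuel board) y_start x_start) [] 0 0
    (by simp) (by intro j hj1 hj2; exact absurd hj2 (by simp)) (by intro h; exact absurd h (by simp))
  simp only [List.length_nil, Nat.cast_zero, zero_mul, add_zero, List.nil_append, sub_zero, zero_add] at hmain
  rw [hmain, alt_eq_countP]
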